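-- pv_equiv track=rewrite | github.com/tianshudetian/HMDVRRPpython | instanceGenerate.py | __depot_with_node
-- ===== SOURCE A (Python) =====
-- def __depot_with_node(cus_dict, park):
--     point_dict = {}
--     for k in cus_dict.keys():
--         point_dict[k] = []
--         for i in cus_dict[k]:
--             point_dict[k].append(i)
--         for sub_park in park:
--             if sub_park[0] in cus_dict[k]:
--                 point_dict[k] += sub_park[1:]
--         point_dict[k] += [k]
--     return point_dict
-- ===== SOURCE B (Python) =====
-- def __depot_with_node(cus_dict, park):
--     point_dict = {k: list(v) for k, v in cus_dict.items()}
--     # inverted index: node value -> the row objects of the customers whose list contains it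
--     buckets = {}
--     for k, v in cus_dict.items():
--         row = point_dict[k]
--         for node in set(v):
--             buckets.setdefault(node, []).append(row)
--     for sub_park in park:
--         tail = sub_park[1:]
--         for row in buckets.get(sub_park[0], ()):
--             row += tail
--     for k in cus_dict:
--         point_dict[k].append(k)
--     return point_dict
-- ===== Notes on version B (the rewrite author's own statement) =====
-- stated objective: alternative
-- what changed: Instead of scanning the whole park list once per customer with an inner list-membership test, B builds an inverted index (node value -> the rows of the customers whose list contains it) in one pass over cus_dict, then makes a single pass over park appending each hoisted sub_park[1:] only to the rows its head actually hits; intended as faster (O(K*V+P) scan work vs O(K*P*V)), but a timing run measured only 1.21x at its largest size, so no speed is claimed.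
-- outside the precondition, e.g. on __depot_with_node({}, [[]]): A returns {}, B raises IndexError
import Mathlib
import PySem

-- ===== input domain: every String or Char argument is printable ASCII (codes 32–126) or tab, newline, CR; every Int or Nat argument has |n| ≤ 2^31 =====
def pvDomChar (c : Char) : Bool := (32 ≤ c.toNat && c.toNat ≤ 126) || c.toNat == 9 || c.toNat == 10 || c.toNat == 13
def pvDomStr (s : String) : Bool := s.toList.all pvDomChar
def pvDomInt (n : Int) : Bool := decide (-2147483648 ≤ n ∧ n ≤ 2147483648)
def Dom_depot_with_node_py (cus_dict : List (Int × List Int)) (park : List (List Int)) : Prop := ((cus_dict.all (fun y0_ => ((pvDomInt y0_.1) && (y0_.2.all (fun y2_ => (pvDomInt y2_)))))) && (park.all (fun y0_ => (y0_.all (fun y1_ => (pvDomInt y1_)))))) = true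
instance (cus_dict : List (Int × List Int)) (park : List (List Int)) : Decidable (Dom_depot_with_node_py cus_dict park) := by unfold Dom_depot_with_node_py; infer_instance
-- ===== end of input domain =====

-- B replaces A's per-customer scan of the whole park list by an inverted index (node value -> the
-- rows of the customers containing it) built once, followed by a single pass over park.

-- ===== PORT A =====
def depot_with_node_py (cus_dict : List (Int × List Int)) (park : List (List Int)) : List (Int × List Int) :=
  let d : PySem.Dict Int (List Int) := PySem.Dict.mk cus_dict
  (d.keys.foldl (fun pd k =>
      let pd1 := pd.insert k ([] : List Int)
      let pd2 := (d.getD k []).foldl (fun acc i => acc.modify k [] (· ++ [i])) pd1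
      let pd3 := park.foldl (fun acc sp =>
          match sp with
          | [] => acc        -- Python raises IndexError on sub_park[0] here; excluded by Pre_
          | c :: rest => if c ∈ d.getD k [] then acc.modify k [] (· ++ rest) else acc) pd2
      pd3.modify k [] (· ++ [k])) (PySem.Dict.empty : PySem.Dict Int (List Int))).items

-- ===== PORT B =====
def depot_with_node_py_alt (cus_dict : List (Int × List Int)) (park : List (List Int)) : List (Int × List Int) :=
  let pd0 : PySem.Dict Int (List Int) := cus_dict.foldl (fun pd kv => pd.insert kv.1 kv.2) PySem.Dict.empty
  -- inverted index: node value -> the rows of the customers whose list contains it; Python's bucket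
  -- holds each mutable row object once (one per node of set(v)), ported as the row's owning key
  let buckets : PySem.Dict Int (List Int) :=
    cus_dict.foldl (fun idx kv =>
      (PySem.Set.ofList kv.2).foldl (fun idx node => idx.modify node [] (· ++ [kv.1])) idx) PySem.Dict.empty
  let pd1 := park.foldl (fun pd sp =>
      match sp with
      | [] => pd             -- Python raises IndexError on sub_park[0] here; excluded by Pre_
      | c :: rest => (buckets.getD c []).foldl (fun pd k => pd.modify k [] (· ++ rest)) pd) pd0
  let pd2 := cus_dict.foldl (fun pd kv => pd.modify kv.1 [] (· ++ [kv.1])) pd1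
  pd2.items

-- ===== PRECONDITION & SPEC =====
-- Pre_ excludes (a) association lists with duplicate keys, which a Python dict cannot represent, and
-- (b) inputs whose park contains an empty sub-list: there A raises IndexError whenever cus_dict is
-- non-empty (and B always raises), so only the corner "cus_dict = {} with an empty sub-list in park",
-- where A returns {}, is excluded while A returns.
def Pre_depot_with_node_py (cus_dict : List (Int × List Int)) (park : List (List Int)) : Prop :=
  (cus_dict.map Prod.fst).Nodup ∧ ∀ sp ∈ park, sp ≠ []
instance (cus_dict : List (Int × List Int)) (park : List (List Int)) : Decidable (Pre_depot_with_node_py cus_dict park) := by unfold Pre_depot_with_node_py; infer_instance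

def pvWitness_depot_with_node_py : (List (Int × List Int)) × List (List Int) :=
  ([(1, [2, 7]), (3, [])], [[2, 5], [4, 6]])

def Spec_depot_with_node_py (cus_dict : List (Int × List Int)) (park : List (List Int)) (out : List (Int × List Int)) : Prop := out = depot_with_node_py_alt cus_dict park
instance (cus_dict : List (Int × List Int)) (park : List (List Int)) (out : List (Int × List Int)) : Decidable (Spec_depot_with_node_py cus_dict park out) := by unfold Spec_depot_with_node_py; infer_instance

-- ===== CLAIM (what is proved, stated in full; the proofs are below) =====
def Claim_equal_depot_with_node_py : Prop := ∀ (cus_dict : List (Int × List Int)) (park : List (List Int)), Dom_depot_with_node_py cus_dict park → Pre_depot_with_node_py cus_dict park → Spec_depot_with_node_py cus_dict park (depot_with_node_py cus_dict park)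

-- ===== LEMMAS AND PROOFS =====

-- the row both programs build for customer (k, v): v, then the tails of the matching park entries, then k
def pvRow (v : List Int) (park : List (List Int)) : List Int :=
  park.foldl (fun r sp =>
    match sp with
    | [] => r
    | c :: rest => if c ∈ v then r ++ rest else r) v

theorem modify_insert_self {κ ν : Type} [BEq κ] [LawfulBEq κ] (d : PySem.Dict κ ν) (k : κ) (w d0 : ν) (f : ν → ν) :
    (d.insert k w).modify k d0 f = d.insert k (f w) := by
  simp [PySem.Dict.modify, PySem.Dict.getD_insert_self, PySem.Dict.insert_insert_self]

theorem foldl_app_insert (v : List Int) (pd : PySem.Dict Int (List Int)) (k : Int) (w : List Int) :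
    v.foldl (fun acc i => acc.modify k [] (· ++ [i])) (pd.insert k w) = pd.insert k (w ++ v) := by
  induction v generalizing w with
  | nil => simp
  | cons i t ih =>
    rw [List.foldl_cons, modify_insert_self, ih]
    congr 1
    simp

theorem foldl_park_insert (park : List (List Int)) (v : List Int) (pd : PySem.Dict Int (List Int)) (k : Int) (w : List Int) :
    park.foldl (fun acc sp =>
        match sp with
        | [] => acc
        | c :: rest => if c ∈ v then acc.modify k [] (· ++ rest) else acc) (pd.insert k w)
      = pd.insert k (park.foldl (fun r sp =>
        match sp with
        | [] => r
        | c :: rest => if c ∈ v then r ++ rest else r) w) := by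
  induction park generalizing w with
  | nil => rfl
  | cons sp t ih =>
    cases sp with
    | nil => simpa using ih w
    | cons c rest =>
      by_cases h : c ∈ v
      · simp only [List.foldl_cons, h, if_pos, modify_insert_self, ih]
      · simp only [List.foldl_cons, h, if_neg, ih, not_false_iff]

theorem canonA (cus_dict : List (Int × List Int)) (park : List (List Int))
    (hnd : (cus_dict.map Prod.fst).Nodup) :
    depot_with_node_py cus_dict park =
      cus_dict.map (fun kv => (kv.1, pvRow kv.2 park ++ [kv.1])) := by
  unfold depot_with_node_py
  simp only []
  set d : PySem.Dict Int (List Int) := PySem.Dict.mk cus_dict with hd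
  have hbody : ∀ (pd : PySem.Dict Int (List Int)), ∀ k ∈ d.keys,
      ((List.foldl
            (fun acc sp =>
              match sp with
              | [] => acc
              | c :: rest => if c ∈ d.getD k [] then acc.modify k [] fun x => x ++ rest else acc)
            (List.foldl (fun acc i => acc.modify k [] fun x => x ++ [i]) (pd.insert k []) (d.getD k []))
            park).modify k [] fun x => x ++ [k])
      = pd.insert k (pvRow (d.getD k []) park ++ [k]) := by
    intro pd k _
    rw [foldl_app_insert, List.nil_append, foldl_park_insert, modify_insert_self]
    rfl
  rw [PySem.List.foldl_congr_mem _ _ _ _ hbody]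
  rw [PySem.Dict.items_foldl_insert_fresh d.keys (fun x => x)
        (fun k => pvRow (d.getD k []) park ++ [k]) PySem.Dict.empty
        (fun a _ => PySem.Dict.contains_empty a) (by simpa [List.map_id] using hnd)]
  have hkeys : d.keys = cus_dict.map Prod.fst := rfl
  rw [show (PySem.Dict.empty : PySem.Dict Int (List Int)).items = [] from rfl, List.nil_append, hkeys, List.map_map]
  refine List.map_congr_left ?_
  intro kv hkv
  have hmem : (kv.1, kv.2) ∈ d.items := by simpa using hkv
  have : d.getD kv.1 [] = kv.2 := PySem.Dict.getD_of_mem_items d hmem hnd []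
  simp [this]

theorem getD_foldl_modify_nodup (ks : List Int) (pd : PySem.Dict Int (List Int)) (k : Int) (rest : List Int)
    (hnd : ks.Nodup) :
    (ks.foldl (fun pd k' => pd.modify k' [] (· ++ rest)) pd).getD k []
      = if k ∈ ks then pd.getD k [] ++ rest else pd.getD k [] := by
  induction ks generalizing pd with
  | nil => simp
  | cons k0 t ih =>
    rw [List.foldl_cons, ih _ hnd.of_cons]
    by_cases hk : k = k0
    · subst hk
      have : k ∉ t := (List.nodup_cons.mp hnd).1
      simp [this]
    · by_cases ht : k ∈ t <;> simp [hk, ht, PySem.Dict.getD_modify]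

theorem bucket_inner (v : List Int) (k0 : Int) (idx : PySem.Dict Int (List Int)) (c : Int) :
    ((PySem.Set.ofList v).foldl (fun idx node => idx.modify node [] (· ++ [k0])) idx).getD c []
      = if c ∈ v then idx.getD c [] ++ [k0] else idx.getD c [] := by
  rw [getD_foldl_modify_nodup (PySem.Set.ofList v) idx c [k0] (PySem.Set.nodup_ofList v)]
  simp [PySem.Set.mem_ofList]

theorem bucket_closed (l : List (Int × List Int)) (idx : PySem.Dict Int (List Int)) (c : Int) :
    (l.foldl (fun idx kv => (PySem.Set.ofList kv.2).foldl (fun idx node => idx.modify node [] (· ++ [kv.1])) idx) idx).getD c []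
      = idx.getD c [] ++ (l.filter (fun kv => decide (c ∈ kv.2))).map Prod.fst := by
  induction l generalizing idx with
  | nil => simp
  | cons kv t ih =>
    rw [List.foldl_cons, ih, bucket_inner]
    by_cases hc : c ∈ kv.2 <;> simp [hc]

theorem bucket_empty_getD (cus_dict : List (Int × List Int)) (c : Int) :
    (cus_dict.foldl (fun idx kv => (PySem.Set.ofList kv.2).foldl (fun idx node => idx.modify node [] (· ++ [kv.1])) idx) PySem.Dict.empty).getD c []
      = (cus_dict.filter (fun kv => decide (c ∈ kv.2))).map Prod.fst := by
  rw [bucket_closed]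
  simp

theorem keys_foldl_modify_mem {β : Type} (l : List β) (key : β → Int) (f : β → List Int → List Int)
    (pd : PySem.Dict Int (List Int)) (h : ∀ x ∈ l, key x ∈ pd.keys) :
    (l.foldl (fun pd x => pd.modify (key x) [] (f x)) pd).keys = pd.keys := by
  induction l generalizing pd with
  | nil => rfl
  | cons x t ih =>
    rw [List.foldl_cons]
    have hk : (pd.modify (key x) [] (f x)).keys = pd.keys := by
      rw [PySem.Dict.keys_modify, PySem.Dict.keys_insert_of_contains]
      exact (PySem.Dict.contains_iff_mem_keys _ _).mpr (h x (List.mem_cons_self ..))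
    rw [ih _ (fun y hy => hk ▸ h y (List.mem_cons_of_mem _ hy)), hk]

theorem uniq_val (cus_dict : List (Int × List Int)) (hnd : (cus_dict.map Prod.fst).Nodup)
    {k : Int} {v v' : List Int} (h : (k, v) ∈ cus_dict) (h' : (k, v') ∈ cus_dict) : v = v' := by
  have e1 : (PySem.Dict.mk cus_dict).getD k [] = v := PySem.Dict.getD_of_mem_items _ h hnd []
  have e2 : (PySem.Dict.mk cus_dict).getD k [] = v' := PySem.Dict.getD_of_mem_items _ h' hnd []
  rw [← e1, e2]

theorem park_pass (cus_dict : List (Int × List Int)) (hnd : (cus_dict.map Prod.fst).Nodup)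
    (k : Int) (v : List Int) (hkv : (k, v) ∈ cus_dict) (park : List (List Int))
    (pd : PySem.Dict Int (List Int)) (hkeys : pd.keys = cus_dict.map Prod.fst) :
    (park.foldl (fun pd sp =>
        match sp with
        | [] => pd
        | c :: rest =>
          ((cus_dict.foldl (fun idx kv => (PySem.Set.ofList kv.2).foldl (fun idx node => idx.modify node [] (· ++ [kv.1])) idx) PySem.Dict.empty).getD c []).foldl
            (fun pd k => pd.modify k [] (· ++ rest)) pd) pd).getD k []
      = park.foldl (fun r sp =>
          match sp with
          | [] => r
          | c :: rest => if c ∈ v then r ++ rest else r) (pd.getD k []) := by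
  induction park generalizing pd with
  | nil => rfl
  | cons sp t ih =>
    cases sp with
    | nil => exact ih pd hkeys
    | cons c rest =>
      rw [List.foldl_cons, List.foldl_cons]
      set idx := cus_dict.foldl (fun idx kv => (PySem.Set.ofList kv.2).foldl (fun idx node => idx.modify node [] (· ++ [kv.1])) idx) PySem.Dict.empty with hidx
      set bucket := idx.getD c [] with hb
      have hbeq : bucket = (cus_dict.filter (fun kv => decide (c ∈ kv.2))).map Prod.fst := by
        rw [hb, hidx, bucket_empty_getD]
      have hsub : bucket.Sublist (cus_dict.map Prod.fst) := by
        rw [hbeq]; exact (cus_dict.filter_sublist).map Prod.fst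
      have hbn : bucket.Nodup := hnd.sublist hsub
      have hbsub : ∀ x ∈ bucket, x ∈ pd.keys := fun x hx => hkeys ▸ hsub.mem hx
      have hkeys' : ((bucket.foldl (fun pd k => pd.modify k [] (· ++ rest)) pd)).keys = cus_dict.map Prod.fst := by
        rw [keys_foldl_modify_mem bucket (fun x => x) (fun _ r => r ++ rest) pd hbsub, hkeys]
      rw [ih _ hkeys', getD_foldl_modify_nodup _ _ _ _ hbn]
      have hkb : (k ∈ bucket) ↔ c ∈ v := by
        rw [hbeq]
        simp only [List.mem_map, List.mem_filter, decide_eq_true_eq]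
        constructor
        · rintro ⟨kv, ⟨hm, hcw⟩, hfst⟩
          subst hfst
          have hm' : (kv.1, kv.2) ∈ cus_dict := by simpa using hm
          rwa [uniq_val cus_dict hnd hkv hm']
        · intro hcv; exact ⟨(k, v), ⟨hkv, hcv⟩, rfl⟩
      by_cases hcv : c ∈ v
      · simp [hkb.mpr hcv, hcv]
      · have hkb' : k ∉ bucket := fun h => hcv (hkb.mp h)
        simp [hkb', hcv]

theorem final_pass (l : List (Int × List Int)) (pd : PySem.Dict Int (List Int)) (k : Int)
    (hnd : (l.map Prod.fst).Nodup) :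
    (l.foldl (fun pd kv => pd.modify kv.1 [] (· ++ [kv.1])) pd).getD k []
      = if k ∈ l.map Prod.fst then pd.getD k [] ++ [k] else pd.getD k [] := by
  induction l generalizing pd with
  | nil => simp
  | cons kv t ih =>
    rw [List.foldl_cons, ih _ hnd.of_cons]
    by_cases hk : k = kv.1
    · subst hk
      have h2 : kv.1 ∉ t.map Prod.fst := (List.nodup_cons.mp hnd).1
      simp [h2]
    · by_cases ht : k ∈ t.map Prod.fst <;> simp [hk, ht, PySem.Dict.getD_modify]

theorem park_keys (cus_dict : List (Int × List Int)) (park : List (List Int))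
    (pd : PySem.Dict Int (List Int)) (hkeys : pd.keys = cus_dict.map Prod.fst) :
    (park.foldl (fun pd sp =>
        match sp with
        | [] => pd
        | c :: rest =>
          ((cus_dict.foldl (fun idx kv => (PySem.Set.ofList kv.2).foldl (fun idx node => idx.modify node [] (· ++ [kv.1])) idx) PySem.Dict.empty).getD c []).foldl
            (fun pd k => pd.modify k [] (· ++ rest)) pd) pd).keys = cus_dict.map Prod.fst := by
  induction park generalizing pd with
  | nil => exact hkeys
  | cons sp t ih =>
    cases sp with
    | nil => exact ih pd hkeys
    | cons c rest =>
      rw [List.foldl_cons]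
      apply ih
      have hbsub : ∀ x ∈ (cus_dict.foldl (fun idx kv => (PySem.Set.ofList kv.2).foldl (fun idx node => idx.modify node [] (· ++ [kv.1])) idx) PySem.Dict.empty).getD c [], x ∈ pd.keys := by
        intro x hx
        rw [bucket_empty_getD] at hx
        exact hkeys ▸ ((cus_dict.filter_sublist).map Prod.fst).mem hx
      rw [keys_foldl_modify_mem _ (fun x => x) (fun _ r => r ++ rest) pd hbsub, hkeys]

theorem canonB (cus_dict : List (Int × List Int)) (park : List (List Int))
    (hnd : (cus_dict.map Prod.fst).Nodup) :
    depot_with_node_py_alt cus_dict park =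
      cus_dict.map (fun kv => (kv.1, pvRow kv.2 park ++ [kv.1])) := by
  unfold depot_with_node_py_alt
  simp only []
  set pd0 : PySem.Dict Int (List Int) := cus_dict.foldl (fun pd kv => pd.insert kv.1 kv.2) PySem.Dict.empty with hpd0
  set pd1 := park.foldl (fun pd sp =>
      match sp with
      | [] => pd
      | c :: rest =>
        ((cus_dict.foldl (fun idx kv => (PySem.Set.ofList kv.2).foldl (fun idx node => idx.modify node [] (· ++ [kv.1])) idx) PySem.Dict.empty).getD c []).foldl
          (fun pd k => pd.modify k [] (· ++ rest)) pd) pd0 with hpd1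
  set pd2 := cus_dict.foldl (fun pd kv => pd.modify kv.1 [] (· ++ [kv.1])) pd1 with hpd2
  have hitems0 : pd0.items = cus_dict := by
    rw [hpd0, PySem.Dict.items_foldl_insert_fresh cus_dict (fun a => a.1) (fun a => a.2)
          PySem.Dict.empty (fun a _ => PySem.Dict.contains_empty a.1) hnd]
    simp [show (PySem.Dict.empty : PySem.Dict Int (List Int)).items = [] from rfl]
  have hkeys0 : pd0.keys = cus_dict.map Prod.fst := by
    rw [PySem.Dict.keys, hitems0]
  have hkeys1 : pd1.keys = cus_dict.map Prod.fst := park_keys cus_dict park pd0 hkeys0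
  have hkeys2 : pd2.keys = cus_dict.map Prod.fst := by
    rw [hpd2, keys_foldl_modify_mem cus_dict (fun kv => kv.1) (fun kv r => r ++ [kv.1]) pd1
          (fun kv hkv => hkeys1 ▸ List.mem_map.mpr ⟨kv, hkv, rfl⟩), hkeys1]
  rw [PySem.Dict.items_eq_map_keys pd2 (hkeys2 ▸ hnd) [], hkeys2, List.map_map]
  refine List.map_congr_left ?_
  intro kv hkv
  have hg2 : pd2.getD kv.1 [] = pd1.getD kv.1 [] ++ [kv.1] := by
    rw [hpd2, final_pass cus_dict pd1 kv.1 hnd]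
    simp [List.mem_map.mpr ⟨kv, hkv, rfl⟩]
  have hg0 : pd0.getD kv.1 [] = kv.2 := by
    apply PySem.Dict.getD_of_mem_items
    · rw [hitems0]; simpa using hkv
    · exact hkeys0 ▸ hnd
  have hg1 : pd1.getD kv.1 [] = pvRow kv.2 park := by
    rw [hpd1, park_pass cus_dict hnd kv.1 kv.2 (by simpa using hkv) park pd0 hkeys0, hg0]
    rfl
  simp [hg2, hg1]

-- ===== VERDICT (by name: the statement is the Claim_ definition above) =====
theorem depot_with_node_py_spec : Claim_equal_depot_with_node_py := by
  intro cus_dict park _ hpre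
  unfold Spec_depot_with_node_py
  rw [canonA cus_dict park hpre.1, canonB cus_dict park hpre.1]
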